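-- pv_equiv track=rewrite | github.com/AREA4-Brunch/tsp | commands/bellman_held_karp/analize_results.py | space
-- ===== SOURCE A (Python) =====
-- import math
--
-- def space(n, cycle: bool, is_symmetric: bool,
--           tc=2, tv=1, no_path=False):
--     if cycle:
--         n -= 1
--     if n <= 1:
--         return 1 * tc + 1 * tv
--     next_k = n // 2
--     next_cost = (next_k) *  math.comb(n, next_k)
--     if n <= 2:
--         prev_k = 0
--     else:
--         prev_k = n // 2 + (-1 if is_symmetric else 1)
--     prev_cost = prev_k *  math.comb(n, prev_k)
--     cost = next_cost + prev_cost
--     if no_path: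
--         return cost * tc
--     max_k = n // 2 if is_symmetric else n - 1
--     prev = sum([ math.comb(n, k - 1) * (n - (k - 1))
--                  for k in range(3, max_k) ])
--     return cost * tc + prev * tv
-- ===== SOURCE B (Python) =====
-- import math
--
-- def space(n, cycle: bool, is_symmetric: bool,
--           tc=2, tv=1, no_path=False):
--     # Uses the absorption identities k*C(n,k) = n*C(n-1,k-1) and
--     # (n-j)*C(n,j) = n*C(n-1,j): every term is expressed over row n-1 of
--     # Pascal's triangle with the factor n pulled out, and the tail sum is one
--     # pass over a running coefficient c = C(n-1, j) updated multiplicatively.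
--     m = n - 1 if cycle else n
--     if m <= 1:
--         return tc + tv
--     half = m // 2
--     cost = m * math.comb(m - 1, half - 1)
--     if m > 2:
--         pk = half + (-1 if is_symmetric else 1)
--         if pk > 0:
--             cost += m * math.comb(m - 1, pk - 1)
--     if no_path:
--         return cost * tc
--     last = (half if is_symmetric else m - 1) - 2
--     s = 0
--     c = (m - 1) * (m - 2) // 2        # C(m-1, 2)
--     for j in range(2, last + 1):
--         s += c
--         c = c * (m - 1 - j) // (j + 1)
--     return cost * tc + m * s * tv
-- ===== Notes on version B (the rewrite author's own statement) =====
-- stated objective: alternative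
-- what changed: B rewrites every term over row n-1 of Pascal's triangle using the absorption identities k*C(n,k)=n*C(n-1,k-1) and (n-j)*C(n,j)=n*C(n-1,j), pulls the common factor n out, and replaces A's summed list comprehension of per-term math.comb calls by one pass over a running coefficient C(n-1,j) updated multiplicatively.
import Mathlib
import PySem

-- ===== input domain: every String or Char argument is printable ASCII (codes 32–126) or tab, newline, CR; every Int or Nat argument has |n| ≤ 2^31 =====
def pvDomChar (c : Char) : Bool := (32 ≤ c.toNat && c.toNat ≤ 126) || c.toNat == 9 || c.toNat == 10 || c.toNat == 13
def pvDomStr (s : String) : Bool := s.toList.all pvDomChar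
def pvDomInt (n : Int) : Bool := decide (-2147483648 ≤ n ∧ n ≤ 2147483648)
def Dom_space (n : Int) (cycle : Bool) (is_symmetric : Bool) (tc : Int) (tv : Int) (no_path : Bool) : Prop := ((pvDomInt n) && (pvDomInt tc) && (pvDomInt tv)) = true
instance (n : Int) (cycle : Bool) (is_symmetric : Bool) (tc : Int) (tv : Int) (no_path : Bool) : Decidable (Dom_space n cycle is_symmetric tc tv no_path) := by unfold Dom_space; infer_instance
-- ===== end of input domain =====

-- B rewrites every term over row n-1 of Pascal's triangle via the absorption identities
-- k*C(n,k) = n*C(n-1,k-1) and (n-j)*C(n,j) = n*C(n-1,j), and accumulates the tail sum in one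
-- pass over a running coefficient updated multiplicatively (objective: alternative).

-- ===== PORT A =====
-- math.comb(n, k): its value for 0 ≤ n, 0 ≤ k (0 when k > n); A never calls it with a negative argument
def combA (n k : Int) : Int :=
  if 0 ≤ n ∧ 0 ≤ k then (n.toNat.choose k.toNat : Int) else 0

def space (n : Int) (cycle : Bool) (is_symmetric : Bool) (tc : Int) (tv : Int) (no_path : Bool) : Int :=
  let n := if cycle then n - 1 else n
  if n ≤ 1 then 1 * tc + 1 * tv
  else
    let next_k := PySem.Int.floordiv n 2
    let next_cost := next_k * combA n next_k
    let prev_k : Int := if n ≤ 2 then 0 else PySem.Int.floordiv n 2 + (if is_symmetric then -1 else 1)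
    let prev_cost := prev_k * combA n prev_k
    let cost := next_cost + prev_cost
    if no_path then cost * tc
    else
      let max_k := if is_symmetric then PySem.Int.floordiv n 2 else n - 1
      let prev := ((PySem.List.pyRange 3 max_k 1).map
        (fun k => combA n (k - 1) * (n - (k - 1)))).foldl (· + ·) 0
      cost * tc + prev * tv

-- ===== PORT B =====
-- math.comb as Source B calls it (Source B only reaches it with both arguments ≥ 0)
def rowChoose (m k : Int) : Int :=
  if 0 ≤ m ∧ 0 ≤ k then (m.toNat.choose k.toNat : Int) else 0

def space_alt (n : Int) (cycle : Bool) (is_symmetric : Bool) (tc : Int) (tv : Int) (no_path : Bool) : Int :=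
  let m := if cycle then n - 1 else n
  if m ≤ 1 then tc + tv
  else
    let half := PySem.Int.floordiv m 2
    let cost0 := m * rowChoose (m - 1) (half - 1)
    let cost :=
      if 2 < m then
        let pk := half + (if is_symmetric then -1 else 1)
        if 0 < pk then cost0 + m * rowChoose (m - 1) (pk - 1) else cost0
      else cost0
    if no_path then cost * tc
    else
      let last := (if is_symmetric then half else m - 1) - 2
      -- for j in range(2, last+1) with state (s, c); c starts at C(m-1, 2)
      let st := (PySem.List.pyRange 2 (last + 1) 1).foldl
        (fun (p : Int × Int) j => (p.1 + p.2, PySem.Int.floordiv (p.2 * (m - 1 - j)) (j + 1)))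
        (0, PySem.Int.floordiv ((m - 1) * (m - 2)) 2)
      cost * tc + m * st.1 * tv

-- ===== PRECONDITION & SPEC =====
def Spec_space (n : Int) (cycle : Bool) (is_symmetric : Bool) (tc : Int) (tv : Int) (no_path : Bool) (out : Int) : Prop := out = space_alt n cycle is_symmetric tc tv no_path
instance (n : Int) (cycle : Bool) (is_symmetric : Bool) (tc : Int) (tv : Int) (no_path : Bool) (out : Int) : Decidable (Spec_space n cycle is_symmetric tc tv no_path out) := by unfold Spec_space; infer_instance

-- ===== CLAIM (what is proved, stated in full; the proofs are below) =====
def Claim_equal_space : Prop := ∀ (n : Int) (cycle : Bool) (is_symmetric : Bool) (tc : Int) (tv : Int) (no_path : Bool), Dom_space n cycle is_symmetric tc tv no_path → Spec_space n cycle is_symmetric tc tv no_path (space n cycle is_symmetric tc tv no_path)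

-- ===== LEMMAS AND PROOFS =====

-- absorption: k * C(N, k) = N * C(N-1, k-1)  (1 ≤ k, 1 ≤ N)
lemma absorb_k (N k : Nat) (hN : 1 ≤ N) (hk : 1 ≤ k) :
    (k : Int) * (N.choose k : Int) = (N : Int) * ((N - 1).choose (k - 1) : Int) := by
  have h := Nat.add_one_mul_choose_eq (N - 1) (k - 1)
  rw [Nat.sub_add_cancel hN, Nat.sub_add_cancel hk] at h
  exact_mod_cast by rw [h]; ring

-- absorption: C(N, j) * (N - j) = N * C(N-1, j)  (j ≤ N, 1 ≤ N)
lemma absorb_nj (N j : Nat) (hN : 1 ≤ N) (hj : j ≤ N) :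
    (N.choose j : Int) * ((N : Int) - (j : Int)) = (N : Int) * ((N - 1).choose j : Int) := by
  have h := Nat.choose_mul_succ_eq (N - 1) j
  rw [Nat.sub_add_cancel hN] at h
  have h2 : ((N : Int) - (j : Int)) = ((N - j : Nat) : Int) := by omega
  rw [h2]
  exact_mod_cast by rw [← h]; ring

-- one multiplicative update of the running binomial coefficient
lemma c_step (M j : Nat) (hj : j < M) :
    PySem.Int.floordiv ((M.choose j : Int) * ((M : Int) - (j : Int))) ((j : Int) + 1)
      = (M.choose (j + 1) : Int) := by
  have h1 : ((M : Int) - (j : Int)) = ((M - j : Nat) : Int) := by omega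
  rw [h1]
  have h2 : ((M.choose j : Int)) * ((M - j : Nat) : Int) = ((M.choose j * (M - j) : Nat) : Int) := by
    push_cast; ring
  rw [h2, ← Nat.choose_succ_right_eq]
  have h3 : ((j : Int) + 1) = ((j + 1 : Nat) : Int) := by push_cast; ring
  rw [h3, PySem.Int.floordiv_natCast]
  rw [Nat.mul_div_cancel _ (Nat.succ_pos j)]

-- the starting coefficient (m-1)*(m-2)//2 is C(m-1, 2)
lemma c2_eq (M : Nat) (h2 : 2 ≤ M + 1) :
    PySem.Int.floordiv ((M : Int) * ((M : Int) - 1)) 2 = (M.choose 2 : Int) := by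
  by_cases h : 1 ≤ M
  · rw [show ((M : Int) * ((M : Int) - 1)) = ((M * (M - 1) : Nat) : Int) by
        push_cast [Nat.cast_sub h]; ring]
    rw [show (2 : Int) = ((2 : Nat) : Int) by norm_num, PySem.Int.floordiv_natCast]
    rw [Nat.choose_two_right]
  · interval_cases M <;> decide

-- loop invariant of B's pass: after j = 2 .. 2+p-1, s = Σ C(M,2+i) and c = C(M, 2+p)
lemma loopAlt (M p : Nat) (hp : 2 + p ≤ M) :
    (PySem.List.pyRange 2 (2 + (p : Int)) 1).foldl
        (fun (st : Int × Int) j => (st.1 + st.2, PySem.Int.floordiv (st.2 * ((M : Int) - j)) (j + 1)))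
        (0, (M.choose 2 : Int))
      = (∑ i ∈ Finset.range p, (M.choose (2 + i) : Int), (M.choose (2 + p) : Int)) := by
  induction p with
  | zero =>
    rw [show (2 : Int) + ((0 : Nat) : Int) = 2 by norm_num, PySem.List.pyRange_one_eq_nil le_rfl]
    simp
  | succ p ih =>
    have hp' : 2 + p ≤ M := by omega
    rw [show (2 : Int) + ((p + 1 : Nat) : Int) = (2 + (p : Int)) + 1 by push_cast; ring,
        PySem.List.pyRange_one_succ_right (by omega), List.foldl_append, ih hp']
    simp only [List.foldl, Prod.mk.injEq]
    constructor
    · rw [Finset.sum_range_succ]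
    · rw [show ((M : Int) - (2 + (p : Int))) = ((M : Int) - ((2 + p : Nat) : Int)) by omega,
          show ((2 + (p : Int)) + 1) = (((2 + p : Nat) : Int) + 1) by omega,
          c_step M (2 + p) (by omega)]
      norm_num [Nat.add_assoc]

-- A's sum over pyRange a (a+m) as a Finset.range sum
lemma fold_sum (g : Int → Int) (a : Int) (m : Nat) :
    ((PySem.List.pyRange a (a + (m : Int)) 1).map g).foldl (· + ·) 0
      = ∑ i ∈ Finset.range m, g (a + (i : Int)) := by
  induction m with
  | zero =>
    rw [show a + ((0 : Nat) : Int) = a by norm_num, PySem.List.pyRange_one_eq_nil le_rfl]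
    simp
  | succ m ih =>
    have hsplit : PySem.List.pyRange a (a + ((m + 1 : Nat) : Int)) 1
        = PySem.List.pyRange a (a + (m : Int)) 1 ++ [a + (m : Int)] := by
      rw [show (a + ((m + 1 : Nat) : Int)) = (a + (m : Int)) + 1 by push_cast; ring]
      exact PySem.List.pyRange_one_succ_right (by omega)
    rw [hsplit, List.map_append, List.foldl_append, ih]
    simp [Finset.sum_range_succ]

lemma A_sum (g : Int → Int) (maxk : Int) :
    ((PySem.List.pyRange 3 maxk 1).map g).foldl (· + ·) 0
      = ∑ i ∈ Finset.range (maxk - 3).toNat, g (3 + (i : Int)) := by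
  by_cases hm : maxk ≤ 3
  · rw [PySem.List.pyRange_one_eq_nil hm]
    rw [show (maxk - 3).toNat = 0 by omega]
    simp
  · conv_lhs => rw [show maxk = 3 + ((maxk - 3).toNat : Int) by omega]
    exact fold_sum g 3 (maxk - 3).toNat

lemma combA_eq (N k : Nat) : combA (N : Int) (k : Int) = (N.choose k : Int) := by
  simp [combA]

lemma rowChoose_eq (N k : Nat) : rowChoose (N : Int) (k : Int) = (N.choose k : Int) := by
  simp [rowChoose]

-- A's comb-per-term sum equals N times the first component of B's running-coefficient loop
lemma sum_eq (N : Nat) (maxk : Int) (hmk : maxk ≤ (N : Int) - 1) (h2 : 2 ≤ N) :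
    ((PySem.List.pyRange 3 maxk 1).map
        (fun k => combA (N : Int) (k - 1) * ((N : Int) - (k - 1)))).foldl (· + ·) 0
      = (N : Int) * ((PySem.List.pyRange 2 ((maxk - 2) + 1) 1).foldl
          (fun (st : Int × Int) j => (st.1 + st.2, PySem.Int.floordiv (st.2 * ((N : Int) - 1 - j)) (j + 1)))
          (0, PySem.Int.floordiv (((N : Int) - 1) * ((N : Int) - 2)) 2)).1 := by
  have hM1 : ((N : Int) - 1) = ((N - 1 : Nat) : Int) := by omega
  have hM2 : ((N : Int) - 2) = (((N - 1 : Nat) : Int) - 1) := by omega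
  rw [A_sum, hM1, hM2, c2_eq (N - 1) (by omega)]
  by_cases h3 : maxk ≤ 3
  · rw [PySem.List.pyRange_one_eq_nil (by omega : (maxk - 2) + 1 ≤ 2)]
    rw [show (maxk - 3).toNat = 0 by omega]
    simp
  · have hm : 2 + (maxk - 3).toNat ≤ N - 1 := by omega
    rw [show (maxk - 2) + 1 = 2 + ((maxk - 3).toNat : Int) by omega, loopAlt (N - 1) (maxk - 3).toNat hm]
    rw [Finset.mul_sum]
    apply Finset.sum_congr rfl
    intro i hi
    have hiN : 2 + i ≤ N := by
      have := Finset.mem_range.mp hi; omega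
    rw [show (3 + (i : Int)) - 1 = ((2 + i : Nat) : Int) by push_cast; ring, combA_eq]
    rw [absorb_nj N (2 + i) (by omega) hiN]

-- cost equality: A's half*C + pk*C against B's absorbed form
lemma cost_eq (N : Nat) (sym : Bool) (h2 : 2 ≤ N) :
    PySem.Int.floordiv (N : Int) 2 * combA (N : Int) (PySem.Int.floordiv (N : Int) 2)
      + (if (N : Int) ≤ 2 then 0 else PySem.Int.floordiv (N : Int) 2 + (if sym then -1 else 1))
        * combA (N : Int) (if (N : Int) ≤ 2 then 0 else PySem.Int.floordiv (N : Int) 2 + (if sym then -1 else 1))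
      = (if 2 < (N : Int) then
          (if 0 < PySem.Int.floordiv (N : Int) 2 + (if sym then -1 else 1) then
            (N : Int) * rowChoose ((N : Int) - 1) (PySem.Int.floordiv (N : Int) 2 - 1)
              + (N : Int) * rowChoose ((N : Int) - 1) ((PySem.Int.floordiv (N : Int) 2 + (if sym then -1 else 1)) - 1)
           else (N : Int) * rowChoose ((N : Int) - 1) (PySem.Int.floordiv (N : Int) 2 - 1))
         else (N : Int) * rowChoose ((N : Int) - 1) (PySem.Int.floordiv (N : Int) 2 - 1)) := by
  have hh : PySem.Int.floordiv (N : Int) 2 = ((N / 2 : Nat) : Int) := by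
    exact_mod_cast PySem.Int.floordiv_natCast N 2
  have hhalf1 : 1 ≤ N / 2 := by omega
  have hM : ((N : Int) - 1) = ((N - 1 : Nat) : Int) := by omega
  have hnext : ((N / 2 : Nat) : Int) * combA (N : Int) ((N / 2 : Nat) : Int)
      = (N : Int) * rowChoose ((N : Int) - 1) (((N / 2 : Nat) : Int) - 1) := by
    rw [combA_eq, hM, show (((N / 2 : Nat) : Int) - 1) = ((N / 2 - 1 : Nat) : Int) by omega,
        rowChoose_eq, absorb_k N (N / 2) (by omega) hhalf1]
  by_cases hN2 : (N : Int) ≤ 2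
  · have : N = 2 := by omega
    subst this; cases sym <;> decide
  · rw [if_neg hN2, if_pos (by omega : 2 < (N : Int)), hh]
    have habs : ∀ pk : Int, 0 < pk →
        pk * combA (N : Int) pk = (N : Int) * rowChoose ((N : Int) - 1) (pk - 1) := by
      intro pk hpk0
      have hpkN : pk = ((pk.toNat : Nat) : Int) := by omega
      rw [hpkN, combA_eq, hM, show ((((pk.toNat : Nat) : Int)) - 1) = ((pk.toNat - 1 : Nat) : Int) by omega,
          rowChoose_eq, absorb_k N pk.toNat (by omega) (by omega)]
    cases sym with
    | true =>
      simp only [reduceIte]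
      by_cases hpk0 : 0 < ((N / 2 : Nat) : Int) + (-1)
      · rw [if_pos hpk0, hnext, habs _ hpk0]
      · rw [if_neg hpk0]
        have h0 : ((N / 2 : Nat) : Int) + (-1) = 0 := by omega
        rw [h0, hnext]
        simp
    | false =>
      have hpk0 : 0 < ((N / 2 : Nat) : Int) + 1 := by omega
      simp only [Bool.false_eq_true, reduceIte]
      rw [if_pos hpk0, hnext, habs _ hpk0]

-- cycle only shifts n; the rest of each port ignores the flag
lemma space_cycle (n : Int) (sym : Bool) (tc tv : Int) (np : Bool) :
    space n true sym tc tv np = space (n - 1) false sym tc tv np := by rfl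

lemma space_alt_cycle (n : Int) (sym : Bool) (tc tv : Int) (np : Bool) :
    space_alt n true sym tc tv np = space_alt (n - 1) false sym tc tv np := by rfl

-- the core equivalence with cycle = false
lemma core_eq (m : Int) (sym : Bool) (tc tv : Int) (np : Bool) :
    space m false sym tc tv np = space_alt m false sym tc tv np := by
  by_cases h1 : m ≤ 1
  · simp only [space, space_alt, Bool.false_eq_true, if_false, if_pos h1]
    ring
  · obtain ⟨N, rfl, hN⟩ : ∃ N : Nat, m = (N : Int) ∧ 2 ≤ N := ⟨m.toNat, by omega, by omega⟩
    have hc := cost_eq N sym hN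
    cases np with
    | true =>
      simp only [space, space_alt, Bool.false_eq_true, if_false, if_true, if_neg h1]
      rw [hc]
    | false =>
      simp only [space, space_alt, Bool.false_eq_true, if_false, if_neg h1]
      have hh : PySem.Int.floordiv (N : Int) 2 = ((N / 2 : Nat) : Int) := by
        exact_mod_cast PySem.Int.floordiv_natCast N 2
      have hs := sum_eq N (if sym = true then PySem.Int.floordiv (N : Int) 2 else (N : Int) - 1)
        (by rw [hh]; cases sym <;> simp <;> omega) hN
      rw [hc, hs]

-- ===== VERDICT (by name: the statement is the Claim_ definition above) =====
theorem space_spec : Claim_equal_space := by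
  intro n cycle sym tc tv np _
  unfold Spec_space
  cases cycle with
  | false => exact core_eq n sym tc tv np
  | true => rw [space_cycle, space_alt_cycle]; exact core_eq (n - 1) sym tc tv np
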